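-- pv_equiv track=rewrite | github.com/jantzen/eugene | eugene/src/tools/clustering.py | check_if_cluster
-- ===== SOURCE A (Python) =====
-- def check_if_cluster(candidate, ordered_lists):
--     """ The condition can be expressed as follows: For any distance ranking (ordered
--     list) that begins with a member of the candidate cluster, each successive
--     item in the ranking must belong to the candidate set until all members have
--     been accounted for.
--     """
--     is_cluster = True
--     for ol in ordered_lists:
--         if ol[0] in candidate:
--         # ignore unless the ranking starts with a member
--         # the candidate set
--             switch = 0
--             # run through the whole ranking
--             for ii in range(1, len(ol)):
--                 if (((not ol[ii] in candidate) and (ol[ii-1] in candidate)) or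
--                     ((ol[ii] in candidate) and (not ol[ii-1] in candidate))):
--                     switch += 1
--             if switch > 1:
--                 is_cluster = False
--
--     return is_cluster
-- ===== SOURCE B (Python) =====
-- def check_if_cluster(candidate, ordered_lists):
--     # Different characterization: a ranking starting with a member is valid
--     # iff its members occupy exactly the first k positions, where
--     # k = number of members in the ranking (count pass + prefix-check pass),
--     # instead of counting membership transitions.
--     cand = set(candidate)
--     ok = True
--     for ol in ordered_lists:
--         if ol[0] in cand:
--             k = sum(1 for x in ol if x in cand)
--             if not all(x in cand for x in ol[:k]):
--                 ok = False
--     return ok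
-- ===== Notes on version B (the rewrite author's own statement) =====
-- stated objective: alternative
-- what changed: Replaces A's per-list membership-transition counter (comparing adjacent pairs and testing switch > 1) with a different characterization: count k = number of candidate members in the ranking, then verify the first k positions are all members (count pass + prefix-check pass over a set).
import Mathlib
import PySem

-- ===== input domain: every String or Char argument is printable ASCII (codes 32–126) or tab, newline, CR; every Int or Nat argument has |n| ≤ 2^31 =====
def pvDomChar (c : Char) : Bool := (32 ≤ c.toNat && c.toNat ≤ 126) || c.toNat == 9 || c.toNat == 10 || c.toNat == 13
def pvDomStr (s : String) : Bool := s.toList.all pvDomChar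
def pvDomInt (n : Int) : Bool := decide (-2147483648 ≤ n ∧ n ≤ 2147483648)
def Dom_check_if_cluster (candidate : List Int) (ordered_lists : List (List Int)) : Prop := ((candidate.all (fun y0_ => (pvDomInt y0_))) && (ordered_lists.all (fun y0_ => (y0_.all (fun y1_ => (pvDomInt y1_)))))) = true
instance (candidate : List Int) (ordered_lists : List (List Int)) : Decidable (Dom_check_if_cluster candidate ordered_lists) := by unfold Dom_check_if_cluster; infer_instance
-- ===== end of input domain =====

-- B replaces A's membership-transition counter with a different characterization:
-- count k = number of candidate members in the ranking, then check the first k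
-- positions are all members; objective: alternative.
-- (Pre_ excludes inputs where either Python raises IndexError on an empty ordered list.)


-- ===== PORT A =====
-- inner loop of A: for ii in range(1, len(ol)): count membership transitions
def checkSwitch (candidate : List Int) (ol : List Int) : Nat :=
  (PySem.List.pyRange 1 (ol.length : Int) 1).foldl (fun sw ii =>
    if (!(candidate.contains (PySem.List.pyGetD ol ii 0)) && candidate.contains (PySem.List.pyGetD ol (ii - 1) 0)) ||
       (candidate.contains (PySem.List.pyGetD ol ii 0) && !(candidate.contains (PySem.List.pyGetD ol (ii - 1) 0))) then
      sw + 1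
    else sw) 0

def check_if_cluster (candidate : List Int) (ordered_lists : List (List Int)) : Bool :=
  ordered_lists.foldl (fun is_cluster ol =>
    match PySem.List.pyGet? ol 0 with
    | none => is_cluster      -- Python raises IndexError here; excluded by Pre_
    | some h =>
      if candidate.contains h then
        if checkSwitch candidate ol > 1 then false else is_cluster
      else is_cluster) true

-- ===== PORT B =====
-- k = sum(1 for x in ol if x in cand)
def memCount (cand : PySem.Set Int) (ol : List Int) : Nat :=
  ol.foldl (fun n x => if cand.contains x then n + 1 else n) 0

def check_if_cluster_alt (candidate : List Int) (ordered_lists : List (List Int)) : Bool :=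
  let cand := PySem.Set.ofList candidate
  ordered_lists.foldl (fun ok ol =>
    match ol with
    | [] => ok               -- Python raises IndexError at ol[0]; excluded by Pre_
    | h :: _ =>
      if cand.contains h then
        let k := memCount cand ol
        -- ol[:k] with 0 ≤ k ≤ len(ol) is exactly List.take k
        if !((ol.take k).all cand.contains) then false else ok
      else ok) true

-- ===== PRECONDITION & SPEC =====
-- Pre_ excludes inputs containing an empty ordered list: both Pythons raise IndexError at ol[0] there.
def Pre_check_if_cluster (candidate : List Int) (ordered_lists : List (List Int)) : Prop :=
  ∀ ol ∈ ordered_lists, ol ≠ []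
instance (candidate : List Int) (ordered_lists : List (List Int)) : Decidable (Pre_check_if_cluster candidate ordered_lists) := by unfold Pre_check_if_cluster; infer_instance
def pvWitness_check_if_cluster : List Int × List (List Int) := ([1, 2], [[1, 2, 3], [3, 1]])

def Spec_check_if_cluster (candidate : List Int) (ordered_lists : List (List Int)) (out : Bool) : Prop := out = check_if_cluster_alt candidate ordered_lists
instance (candidate : List Int) (ordered_lists : List (List Int)) (out : Bool) : Decidable (Spec_check_if_cluster candidate ordered_lists out) := by unfold Spec_check_if_cluster; infer_instance

-- ===== CLAIM (what is proved, stated in full; the proofs are below) =====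
def Claim_equal_check_if_cluster : Prop := ∀ (candidate : List Int) (ordered_lists : List (List Int)), Dom_check_if_cluster candidate ordered_lists → Pre_check_if_cluster candidate ordered_lists → Spec_check_if_cluster candidate ordered_lists (check_if_cluster candidate ordered_lists)

-- ===== LEMMAS AND PROOFS =====

-- structural transition counter: prev-membership flag, count flips
def transCnt (candidate : List Int) : Bool → List Int → Nat
  | _, [] => 0
  | p, x :: xs =>
    (if p ≠ candidate.contains x then 1 else 0) + transCnt candidate (candidate.contains x) xs

theorem switch_aux (c : List Int) (t : List Int) : ∀ (h : Int) (acc : Nat),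
    (PySem.List.pyRange 1 ((h :: t).length : Int) 1).foldl (fun sw ii =>
      if (!(c.contains (PySem.List.pyGetD (h :: t) ii 0)) && c.contains (PySem.List.pyGetD (h :: t) (ii - 1) 0)) ||
         (c.contains (PySem.List.pyGetD (h :: t) ii 0) && !(c.contains (PySem.List.pyGetD (h :: t) (ii - 1) 0))) then
        sw + 1
      else sw) acc
    = acc + transCnt c (c.contains h) t := by
  induction t with
  | nil =>
    intro h acc
    simp [transCnt]
  | cons y t' ih =>
    intro h acc
    rw [PySem.List.pyRange_one_cons (by simp)]
    simp only [List.foldl_cons]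
    have g1 : PySem.List.pyGetD (h :: y :: t') 1 0 = y := by
      have e : (1 : Int) = ((1 : Nat) : Int) := by norm_num
      rw [e, PySem.List.pyGetD_natCast]; rfl
    have g0 : PySem.List.pyGetD (h :: y :: t') (1 - 1) 0 = h := by
      norm_num
    have hshift :
        ∀ (sw : Nat),
          (PySem.List.pyRange (1 + 1) (((h :: y :: t').length : Nat) : Int) 1).foldl (fun sw ii =>
            if (!(c.contains (PySem.List.pyGetD (h :: y :: t') ii 0)) && c.contains (PySem.List.pyGetD (h :: y :: t') (ii - 1) 0)) ||
               (c.contains (PySem.List.pyGetD (h :: y :: t') ii 0) && !(c.contains (PySem.List.pyGetD (h :: y :: t') (ii - 1) 0))) then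
              sw + 1
            else sw) sw
        = (PySem.List.pyRange 1 (((y :: t').length : Nat) : Int) 1).foldl (fun sw ii =>
            if (!(c.contains (PySem.List.pyGetD (y :: t') ii 0)) && c.contains (PySem.List.pyGetD (y :: t') (ii - 1) 0)) ||
               (c.contains (PySem.List.pyGetD (y :: t') ii 0) && !(c.contains (PySem.List.pyGetD (y :: t') (ii - 1) 0))) then
              sw + 1
            else sw) sw := by
      intro sw
      have h2 : (1 : Int) + 1 = 2 := by norm_num
      rw [h2, PySem.List.pyRange_one, PySem.List.pyRange_one, List.foldl_map, List.foldl_map]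
      have hn1 : ((((h :: y :: t').length : Nat) : Int) - 2).toNat = t'.length := by
        simp only [List.length_cons]; omega
      have hn2 : ((((y :: t').length : Nat) : Int) - 1).toNat = t'.length := by
        simp only [List.length_cons]; omega
      rw [hn1, hn2]
      have hfun :
          (fun (sw : Nat) (k : Nat) =>
            if (!(c.contains (PySem.List.pyGetD (h :: y :: t') (2 + (k : Int)) 0)) && c.contains (PySem.List.pyGetD (h :: y :: t') (2 + (k : Int) - 1) 0) ||
               (c.contains (PySem.List.pyGetD (h :: y :: t') (2 + (k : Int)) 0) && !(c.contains (PySem.List.pyGetD (h :: y :: t') (2 + (k : Int) - 1) 0)))) = true then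
              sw + 1
            else sw)
          = (fun (sw : Nat) (k : Nat) =>
            if (!(c.contains (PySem.List.pyGetD (y :: t') (1 + (k : Int)) 0)) && c.contains (PySem.List.pyGetD (y :: t') (1 + (k : Int) - 1) 0) ||
               (c.contains (PySem.List.pyGetD (y :: t') (1 + (k : Int)) 0) && !(c.contains (PySem.List.pyGetD (y :: t') (1 + (k : Int) - 1) 0)))) = true then
              sw + 1
            else sw) := by
        funext sw k
        have e2 : (2 : Int) + (k : Int) - 1 = ((k + 1 : Nat) : Int) := by push_cast; ring
        have e1 : (2 : Int) + (k : Int) = ((k + 2 : Nat) : Int) := by push_cast; ring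
        have e4 : (1 : Int) + (k : Int) - 1 = ((k : Nat) : Int) := by ring
        have e3 : (1 : Int) + (k : Int) = ((k + 1 : Nat) : Int) := by push_cast; ring
        rw [e2, e1, e4, e3, PySem.List.pyGetD_natCast, PySem.List.pyGetD_natCast,
            PySem.List.pyGetD_natCast, PySem.List.pyGetD_natCast]
        simp
      rw [hfun]
    rw [hshift, ih y, g1, g0]
    by_cases hch : h ∈ c <;> by_cases hcy : y ∈ c <;>
      simp [transCnt, hch, hcy] <;> omega

theorem checkSwitch_eq_trans (c : List Int) (h : Int) (t : List Int) :
    checkSwitch c (h :: t) = transCnt c (c.contains h) t := by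
  have := switch_aux c t h 0
  simpa [checkSwitch] using this

-- proof-side helper: "left the cluster" flag pass (used only to bridge the two ports)
def flagInner (cand : PySem.Set Int) : List Int → Bool → Bool
  | [], _ => true
  | x :: xs, left =>
    if cand.contains x then
      if left then false else flagInner cand xs left
    else flagInner cand xs true

theorem inner_iff (c : List Int) (t : List Int) :
    (transCnt c true t ≤ 1 ↔ flagInner (PySem.Set.ofList c) t false = true) ∧
    (transCnt c false t = 0 ↔ flagInner (PySem.Set.ofList c) t true = true) := by
  induction t with
  | nil => simp [transCnt, flagInner]
  | cons x xs ih =>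
    by_cases hx : x ∈ c
    · have e1 : transCnt c true (x :: xs) = transCnt c true xs := by
        simp [transCnt, hx]
      have e2 : transCnt c false (x :: xs) = 1 + transCnt c true xs := by
        simp [transCnt, hx]
      have e3 : flagInner (PySem.Set.ofList c) (x :: xs) false = flagInner (PySem.Set.ofList c) xs false := by
        simp [flagInner, hx]
      have e4 : flagInner (PySem.Set.ofList c) (x :: xs) true = false := by
        simp [flagInner, hx]
      refine ⟨by rw [e1, e3]; exact ih.1, ?_⟩
      rw [e2, e4]
      constructor
      · intro h0; exact absurd h0 (by omega)
      · intro hb; exact absurd hb (by simp)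
    · have e1 : transCnt c true (x :: xs) = 1 + transCnt c false xs := by
        simp [transCnt, hx]
      have e2 : transCnt c false (x :: xs) = transCnt c false xs := by
        simp [transCnt, hx]
      have e3 : flagInner (PySem.Set.ofList c) (x :: xs) false = flagInner (PySem.Set.ofList c) xs true := by
        simp [flagInner, hx]
      have e4 : flagInner (PySem.Set.ofList c) (x :: xs) true = flagInner (PySem.Set.ofList c) xs true := by
        simp [flagInner, hx]
      refine ⟨?_, by rw [e2, e4]; exact ih.2⟩
      rw [e1, e3]
      constructor
      · intro hle; exact ih.2.1 (by omega)
      · intro hb; have := ih.2.2 hb; omega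

theorem memCount_aux (cand : PySem.Set Int) (l : List Int) : ∀ (n : Nat),
    l.foldl (fun n x => if cand.contains x then n + 1 else n) n = n + l.countP cand.contains := by
  induction l with
  | nil => intro n; simp
  | cons x xs ih =>
    intro n
    simp only [List.foldl_cons, List.countP_cons]
    rw [ih]
    by_cases hx : x ∈ cand <;> simp [hx] <;> omega

theorem memCount_eq (cand : PySem.Set Int) (l : List Int) :
    memCount cand l = l.countP cand.contains := by
  simpa [memCount] using memCount_aux cand l 0

theorem flag_true_iff (cand : PySem.Set Int) (l : List Int) :
    flagInner cand l true = true ↔ l.countP cand.contains = 0 := by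
  induction l with
  | nil => simp [flagInner]
  | cons x xs ih =>
    by_cases hx : x ∈ cand
    · have h1 : flagInner cand (x :: xs) true = false := by simp [flagInner, hx]
      have h2 : (x :: xs).countP cand.contains = xs.countP cand.contains + 1 := by
        simp [List.countP_cons, hx]
      rw [h1, h2]
      simp
    · have h1 : flagInner cand (x :: xs) true = flagInner cand xs true := by simp [flagInner, hx]
      have h2 : (x :: xs).countP cand.contains = xs.countP cand.contains := by
        simp [List.countP_cons, hx]
      rw [h1, h2]; exact ih

theorem flag_false_iff (cand : PySem.Set Int) (l : List Int) :
    flagInner cand l false = true ↔ (l.take (l.countP cand.contains)).all cand.contains = true := by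
  induction l with
  | nil => simp [flagInner]
  | cons x xs ih =>
    by_cases hx : x ∈ cand
    · have hxb : cand.contains x = true := by simp [hx]
      have h1 : flagInner cand (x :: xs) false = flagInner cand xs false := by simp [flagInner, hx]
      have h2 : (x :: xs).countP cand.contains = xs.countP cand.contains + 1 := by
        simp [List.countP_cons, hx]
      rw [h1, h2, List.take_succ_cons, List.all_cons, hxb, Bool.true_and]
      exact ih
    · have h1 : flagInner cand (x :: xs) false = flagInner cand xs true := by simp [flagInner, hx]
      have hc : (x :: xs).countP cand.contains = xs.countP cand.contains := by
        simp [List.countP_cons, hx]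
      rw [h1, flag_true_iff, hc]
      constructor
      · intro h0; rw [h0]; simp
      · intro hall
        by_contra hne
        have hpos : 0 < xs.countP cand.contains := Nat.pos_of_ne_zero hne
        have hxmem : x ∈ (x :: xs).take (xs.countP cand.contains) := by
          cases hk : xs.countP cand.contains with
          | zero => omega
          | succ m => simp [List.take_succ_cons]
        have := List.all_eq_true.mp hall x hxmem
        simp [hx] at this

-- the two per-list updates agree on non-empty lists
theorem step_eq (candidate : List Int) (h : Int) (t : List Int) (acc : Bool) :
    (match PySem.List.pyGet? (h :: t) 0 with
     | none => acc
     | some x =>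
       if candidate.contains x then
         if checkSwitch candidate (h :: t) > 1 then false else acc
       else acc)
    = (if (PySem.Set.ofList candidate).contains h then
         if !(((h :: t).take (memCount (PySem.Set.ofList candidate) (h :: t))).all (PySem.Set.ofList candidate).contains) then false else acc
       else acc) := by
  simp only [PySem.List.pyGet?_zero_cons]
  by_cases hch : h ∈ candidate
  · have hscont : (PySem.Set.ofList candidate).contains h = true := by
      simp [PySem.Set.mem_ofList, hch]
    have hk : memCount (PySem.Set.ofList candidate) (h :: t)
        = t.countP (PySem.Set.ofList candidate).contains + 1 := by
      rw [memCount_eq, List.countP_cons, hscont]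
      simp
    have htake : (((h :: t).take (memCount (PySem.Set.ofList candidate) (h :: t))).all (PySem.Set.ofList candidate).contains)
        = ((t.take (t.countP (PySem.Set.ofList candidate).contains)).all (PySem.Set.ofList candidate).contains) := by
      rw [hk, List.take_succ_cons, List.all_cons, hscont, Bool.true_and]
    rw [checkSwitch_eq_trans]
    by_cases hle : transCnt candidate (candidate.contains h) t ≤ 1
    · have hle' : transCnt candidate true t ≤ 1 := by
        rwa [show candidate.contains h = true from by simp [hch]] at hle
      have hta : (t.take (t.countP (PySem.Set.ofList candidate).contains)).all (PySem.Set.ofList candidate).contains = true :=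
        (flag_false_iff _ t).mp ((inner_iff candidate t).1.1 hle')
      have htaketrue := htake.trans hta
      simp [hch, htaketrue, Nat.not_lt_of_le hle']
    · have hgt : transCnt candidate (candidate.contains h) t > 1 := by omega
      have hgt' : transCnt candidate true t > 1 := by
        rwa [show candidate.contains h = true from by simp [hch]] at hgt
      have hta : (t.take (t.countP (PySem.Set.ofList candidate).contains)).all (PySem.Set.ofList candidate).contains = false := by
        cases hb : (t.take (t.countP (PySem.Set.ofList candidate).contains)).all (PySem.Set.ofList candidate).contains
        · rfl
        · have := (inner_iff candidate t).1.2 ((flag_false_iff _ t).mpr hb)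
          omega
      have htakefalse := htake.trans hta
      simp [hch, htakefalse, hgt']
  · have hscont : (PySem.Set.ofList candidate).contains h = false := by
      simp [PySem.Set.mem_ofList, hch]
    simp [hch]

theorem foldl_eq (candidate : List Int) (ols : List (List Int)) (acc : Bool)
    (hpre : ∀ ol ∈ ols, ol ≠ []) :
    ols.foldl (fun is_cluster ol =>
      match PySem.List.pyGet? ol 0 with
      | none => is_cluster
      | some h =>
        if candidate.contains h then
          if checkSwitch candidate ol > 1 then false else is_cluster
        else is_cluster) acc
    = ols.foldl (fun ok ol =>
        match ol with
        | [] => ok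
        | h :: _ =>
          if (PySem.Set.ofList candidate).contains h then
            if !((ol.take (memCount (PySem.Set.ofList candidate) ol)).all (PySem.Set.ofList candidate).contains) then false else ok
          else ok) acc := by
  induction ols generalizing acc with
  | nil => rfl
  | cons ol rest ih =>
    obtain ⟨h, t, rfl⟩ : ∃ h t, ol = h :: t := by
      cases ol with
      | nil => exact absurd rfl (hpre [] (by simp))
      | cons a b => exact ⟨a, b, rfl⟩
    simp only [List.foldl_cons]
    rw [step_eq candidate h t acc]
    exact ih _ (fun o ho => hpre o (by simp [ho]))

-- ===== VERDICT (by name: the statement is the Claim_ definition above) =====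
theorem check_if_cluster_spec : Claim_equal_check_if_cluster := by
  intro candidate ordered_lists _ hpre
  unfold Spec_check_if_cluster check_if_cluster check_if_cluster_alt
  exact foldl_eq candidate ordered_lists true hpre
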